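-- pv_equiv track=rewrite | github.com/jezonek/pattern_recognition | pattern_recognition.py | create_regex
-- ===== SOURCE A (Python) =====
-- from itertools import zip_longest, takewhile
--
-- def find_repetitions(regex_list):
--     """For each character in the list, the generator calculates successive occurrences
--     :param regex_list: List of consecutive objects in estimated regex
--     :type list
--     :return: Subsequent occurrences of a character
--     :rtype: int
--     """
--     for element in enumerate(regex_list):
--         count = 0
--         for one_try in takewhile(
--             lambda x: x == element[1], regex_list[(element[0] + 1) :]
--         ):
--             count = count + 1
--         yield count
--
-- def create_regex(regex_list):
--     """For a given list, it combines successive occurrences into one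
--     :param regex_list: List containing recurring occurrences
--     :return:Final regex
--     :rtype: str
--     """
--     content = []
--     repetitions = list(zip_longest(regex_list, find_repetitions(regex_list)))
--     waiter = 0
--     for element in repetitions:
--         if waiter > 0:
--             waiter = waiter - 1
--             continue
--         if element[1] > 0:
--             content.append(element[0])
--             content.append("{" + str(element[1] + 1) + "}")
--             waiter = element[1]
--         else:
--             content.append(element[0])
--     return """^{}$""".format("".join(content))
-- ===== SOURCE B (Python) =====
-- def create_regex(regex_list):
--     """Single pass: walk the list with two indices, grouping each maximal run
--     of equal consecutive elements into elem{run_length} (or elem for a run of 1)."""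
--     parts = []
--     i = 0
--     n = len(regex_list)
--     while i < n:
--         j = i + 1
--         while j < n and regex_list[j] == regex_list[i]:
--             j += 1
--         run = j - i
--         if run == 1:
--             parts.append(regex_list[i])
--         else:
--             parts.append(regex_list[i] + "{" + str(run) + "}")
--         i = j
--     return "^{}$".format("".join(parts))
-- ===== Notes on version B (the rewrite author's own statement) =====
-- stated objective: faster
-- what changed: Replaced the per-index generator (which rescans the tail after every element) plus zip_longest and a waiter-skip loop by a single two-pointer pass that advances directly over each maximal run of equal elements.
import Mathlib
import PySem

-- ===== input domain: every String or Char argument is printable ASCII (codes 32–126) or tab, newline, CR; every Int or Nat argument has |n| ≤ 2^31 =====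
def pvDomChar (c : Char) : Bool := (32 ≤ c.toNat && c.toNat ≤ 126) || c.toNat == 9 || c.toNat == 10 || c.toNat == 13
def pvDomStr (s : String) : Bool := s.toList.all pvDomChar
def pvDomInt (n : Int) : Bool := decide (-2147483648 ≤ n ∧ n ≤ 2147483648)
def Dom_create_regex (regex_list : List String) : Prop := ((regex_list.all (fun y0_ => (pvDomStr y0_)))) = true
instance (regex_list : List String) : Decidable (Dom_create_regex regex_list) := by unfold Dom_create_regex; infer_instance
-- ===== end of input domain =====

-- B replaces A's per-index tail rescan (generator + zip_longest + waiter-skip loop) by one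
-- two-pointer pass over maximal runs; objective: faster (O(n) instead of O(n^2)).

-- ===== PORT A =====
-- find_repetitions: for each (i, x) in enumerate(regex_list), the length of the
-- takewhile(== x) prefix of regex_list[i+1:]  (enumerate indices are ≥ 0, so the
-- slice [i+1:] is exactly List.drop (i+1); the counting loop is the takeWhile length).
def findReps (regex_list : List String) : List Nat :=
  (PySem.List.enumerate regex_list).map
    (fun e => ((regex_list.drop (e.1.toNat + 1)).takeWhile (fun x => x == e.2)).length)

-- the 'for element in repetitions' loop with its waiter-skip state
def loopA : List (String × Nat) → Nat → List String → List String
  | [], _, content => content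
  | e :: rest, waiter, content =>
    if waiter > 0 then loopA rest (waiter - 1) content
    else if e.2 > 0 then
      loopA rest e.2 (content ++ [e.1, "{" ++ PySem.Int.toStr ((e.2 : Int) + 1) ++ "}"])
    else loopA rest waiter (content ++ [e.1])

-- zip_longest(regex_list, find_repetitions(regex_list)): the two lists always have the
-- same length (findReps maps over enumerate), so zip_longest is exactly zip.
def create_regex (regex_list : List String) : String :=
  "^" ++ PySem.Str.join "" (loopA (regex_list.zip (findReps regex_list)) 0 []) ++ "$"

-- ===== PORT B =====
-- Source B's outer while: at the head of the remaining list, the inner while advances j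
-- over the run of equal elements (run length = 1 + takeWhile length), one part is
-- appended, and the scan resumes after the run.
def loopB : List String → List String
  | [] => []
  | x :: rest =>
    let k := (rest.takeWhile (fun y => y == x)).length
    (if k = 0 then x else x ++ "{" ++ PySem.Int.toStr ((k : Int) + 1) ++ "}")
      :: loopB (rest.drop k)
termination_by l => l.length
decreasing_by simp

def create_regex_alt (regex_list : List String) : String :=
  "^" ++ PySem.Str.join "" (loopB regex_list) ++ "$"

-- ===== PRECONDITION & SPEC =====
def Spec_create_regex (regex_list : List String) (out : String) : Prop := out = create_regex_alt regex_list
instance (regex_list : List String) (out : String) : Decidable (Spec_create_regex regex_list out) := by unfold Spec_create_regex; infer_instance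

-- ===== CLAIM (what is proved, stated in full; the proofs are below) =====
def Claim_equal_create_regex : Prop := ∀ (regex_list : List String), Dom_create_regex regex_list → Spec_create_regex regex_list (create_regex regex_list)

-- ===== LEMMAS AND PROOFS =====

theorem enum_map_shift {α β : Type} (r : List α) (s : Int) (f : Int × α → β) :
    (PySem.List.enumerate r s).map f
      = (PySem.List.enumerate r 0).map (fun e => f (e.1 + s, e.2)) := by
  induction r generalizing s f with
  | nil => simp [PySem.List.enumerate_nil]
  | cons x xs ih =>
    rw [PySem.List.enumerate_cons, PySem.List.enumerate_cons, List.map_cons, List.map_cons,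
        show (0 : Int) + 1 = 1 from by norm_num,
        ih (s + 1) f, ih 1 (fun e => f (e.1 + s, e.2))]
    refine congrArg₂ _ (by norm_num) (List.map_congr_left ?_)
    intro e _
    have : e.1 + (s + 1) = e.1 + 1 + s := by ring
    simp [this]

theorem findReps_cons (x : String) (r : List String) :
    findReps (x :: r) = (r.takeWhile (fun y => y == x)).length :: findReps r := by
  unfold findReps
  rw [PySem.List.enumerate_cons, List.map_cons, enum_map_shift]
  refine congrArg₂ _ (by simp) (List.map_congr_left ?_)
  intro e he
  rcases (PySem.List.mem_enumerate_iff _ _ _).1 he with ⟨k, hk, rfl⟩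
  simp

theorem findReps_drop (l : List String) (k : Nat) :
    (findReps l).drop k = findReps (l.drop k) := by
  induction l generalizing k with
  | nil => simp [findReps]
  | cons x r ih =>
    cases k with
    | zero => simp
    | succ k' => simp [findReps_cons, ih]

theorem loopA_skip (z : List (String × Nat)) (w : Nat) (content : List String) :
    loopA z w content = loopA (z.drop w) 0 content := by
  induction z generalizing w content with
  | nil => simp [loopA]
  | cons e rest ih =>
    cases w with
    | zero => simp
    | succ w' => simpa [loopA] using ih w' content

theorem zip_drop {α β : Type} (a : List α) (b : List β) (k : Nat) :
    (a.zip b).drop k = (a.drop k).zip (b.drop k) := by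
  induction a generalizing b k with
  | nil => simp
  | cons x xs ih =>
    cases b with
    | nil => simp
    | cons y ys =>
      cases k with
      | zero => simp
      | succ k' => simp [ih]

-- loopB's parts, but as the two content items per run that A's loop appends
def pairsB : List String → List String
  | [] => []
  | x :: rest =>
    let k := (rest.takeWhile (fun y => y == x)).length
    (if k = 0 then [x] else [x, "{" ++ PySem.Int.toStr ((k : Int) + 1) ++ "}"])
      ++ pairsB (rest.drop k)
termination_by l => l.length
decreasing_by simp

theorem loopA_eq_pairsB : ∀ (l content : List String),
    loopA (l.zip (findReps l)) 0 content = content ++ pairsB l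
  | [], content => by simp [findReps, loopA, pairsB]
  | x :: rest, content => by
    rw [findReps_cons, List.zip_cons_cons]
    by_cases h0 : (rest.takeWhile (fun y => y == x)).length = 0
    · rw [show loopA ((x, (rest.takeWhile (fun y => y == x)).length)
            :: rest.zip (findReps rest)) 0 content
          = loopA (rest.zip (findReps rest)) 0 (content ++ [x]) from by
        simp [loopA, h0]]
      rw [loopA_eq_pairsB rest (content ++ [x])]
      conv_rhs => rw [pairsB]
      simp [h0]
    · have hpos : 0 < (rest.takeWhile (fun y => y == x)).length :=
        Nat.pos_of_ne_zero h0
      rw [show loopA ((x, (rest.takeWhile (fun y => y == x)).length)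
            :: rest.zip (findReps rest)) 0 content
          = loopA (rest.zip (findReps rest)) (rest.takeWhile (fun y => y == x)).length
              (content ++ [x, "{" ++ PySem.Int.toStr
                (((rest.takeWhile (fun y => y == x)).length : Int) + 1) ++ "}"]) from by
        simp [loopA, hpos]]
      rw [loopA_skip, zip_drop, findReps_drop,
          loopA_eq_pairsB (rest.drop (rest.takeWhile (fun y => y == x)).length) _]
      conv_rhs => rw [pairsB]
      simp [h0, List.append_assoc]
  termination_by l _ => l.length
  decreasing_by all_goals (simp only [List.length_drop, List.length_cons]; omega)

theorem flat_pairsB_eq_loopB : ∀ (l : List String),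
    ((pairsB l).map String.toList).flatten = ((loopB l).map String.toList).flatten
  | [] => by simp [pairsB, loopB]
  | x :: rest => by
    rw [pairsB, loopB]
    by_cases h0 : (rest.takeWhile (fun y => y == x)).length = 0
    · have hrec := flat_pairsB_eq_loopB rest
      simp [h0, hrec]
    · have hrec := flat_pairsB_eq_loopB (rest.drop (rest.takeWhile (fun y => y == x)).length)
      simp [h0, hrec]
  termination_by l => l.length
  decreasing_by all_goals simp

theorem chars_join_nil_sep : ∀ (l : List (List Char)),
    PySem.Chars.join [] l = l.flatten
  | [] => by simp [PySem.Chars.join_nil]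
  | [a] => by simp [PySem.Chars.join_singleton]
  | a :: b :: t => by
    rw [PySem.Chars.join_cons_cons, chars_join_nil_sep (b :: t)]
    simp

theorem join_empty_toList (parts : List String) :
    (PySem.Str.join "" parts).toList = (parts.map String.toList).flatten := by
  rw [PySem.Str.toList_join]
  simp [chars_join_nil_sep]

theorem join_pairs_eq (l : List String) :
    PySem.Str.join "" (pairsB l) = PySem.Str.join "" (loopB l) := by
  have h : (PySem.Str.join "" (pairsB l)).toList
      = (PySem.Str.join "" (loopB l)).toList := by
    rw [join_empty_toList, join_empty_toList, flat_pairsB_eq_loopB]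
  exact String.toList_inj.mp h

-- ===== VERDICT (by name: the statement is the Claim_ definition above) =====
theorem create_regex_spec : Claim_equal_create_regex := by
  intro l _
  unfold Spec_create_regex create_regex create_regex_alt
  rw [loopA_eq_pairsB l [], List.nil_append, join_pairs_eq]
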